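-- pv_equiv track=rewrite | github.com/eternalseptember/Project-Euler | problem0011.py | searchAdjacentNumbersInGrid
-- ===== SOURCE A (Python) =====
-- def searchAdjacentNumbersInGrid(grid, adjacentNum):
-- 	listSize = len(grid)
-- 	rangeLimit = listSize - adjacentNum + 1  # range excludes last number
-- 	greatestProduct = 0
--
-- 	# grid[0][0] = 08
-- 	# grid[1][0] = 49
-- 	# grid[0][1] = 02
--
-- 	# search vertically
-- 	# 51267216
-- 	for column in range(0, listSize):
-- 		for row in range(0, rangeLimit):
-- 			product = 1
-- 			for i in range(0, adjacentNum):
-- 				product *= int(grid[row + i][column])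
-- 			if product > greatestProduct:
-- 				greatestProduct = product
--
-- 	# search horizonally
-- 	# 48477312
-- 	for row in range(0, listSize):
-- 		for column in range(0, rangeLimit):
-- 			product = 1
-- 			for i in range(0, adjacentNum):
-- 				product *= int(grid[row][column + i])
-- 			if product > greatestProduct:
-- 				greatestProduct = product
--
-- 	# search left-to-right diagonal
--
--
-- 	# search right-to-left diagonal
--
-- 	return greatestProduct
-- ===== SOURCE B (Python) =====
-- def searchAdjacentNumbersInGrid(grid, adjacentNum):
-- 	# Sliding-window running product with a zero counter: each window value
-- 	# is derived from the previous window's value.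
-- 	n = len(grid)
-- 	k = adjacentNum
-- 	if k > n:
-- 		return 0  # no run of k adjacent entries fits in the grid
-- 	lines = [row[:n] for row in grid]
-- 	lines += [[grid[r][c] for r in range(n)] for c in range(n)]
-- 	best = 0
-- 	for line in lines:
-- 		prod = 1   # product of the nonzero entries of the current window
-- 		zeros = 0  # number of zero entries of the current window
-- 		for i in range(n):
-- 			x = line[i]
-- 			if x == 0:
-- 				zeros += 1
-- 			else:
-- 				prod *= x
-- 			if i >= k:
-- 				y = line[i - k]
-- 				if y == 0:
-- 					zeros -= 1
-- 				else:
-- 					prod //= y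
-- 			if i >= k - 1:
-- 				p = prod if zeros == 0 else 0
-- 				if p > best:
-- 					best = p
-- 	return best
-- ===== Notes on version B (the rewrite author's own statement) =====
-- stated objective: alternative
-- what changed: A recomputes each window product by multiplying its k entries from scratch inside three nested loops; B scans each row and each column once with a sliding-window running product plus a zero counter.
-- outside the precondition, e.g. on searchAdjacentNumbersInGrid([[2]], -1): A returns 1, B raises IndexError; on searchAdjacentNumbersInGrid([[1], [2, 3]], 0): A returns 1, B raises IndexError
import Mathlib
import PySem

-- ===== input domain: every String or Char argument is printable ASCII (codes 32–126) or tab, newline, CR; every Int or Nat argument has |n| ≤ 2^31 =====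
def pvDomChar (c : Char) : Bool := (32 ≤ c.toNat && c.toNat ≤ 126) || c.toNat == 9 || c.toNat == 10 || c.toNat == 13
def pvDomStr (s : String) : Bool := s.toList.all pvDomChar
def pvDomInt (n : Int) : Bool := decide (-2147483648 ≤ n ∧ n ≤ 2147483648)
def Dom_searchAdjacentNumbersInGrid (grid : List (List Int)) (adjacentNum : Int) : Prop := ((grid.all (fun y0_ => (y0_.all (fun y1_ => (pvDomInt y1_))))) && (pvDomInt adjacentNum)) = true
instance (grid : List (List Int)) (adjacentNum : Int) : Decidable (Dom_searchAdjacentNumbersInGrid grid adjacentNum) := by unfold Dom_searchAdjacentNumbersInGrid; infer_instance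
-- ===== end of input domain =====

-- B replaces A's per-window re-multiplication of the k entries by a sliding-window
-- running product with a zero counter over each row/column line (objective: alternative).

-- ===== PORT A =====
def searchAdjacentNumbersInGrid (grid : List (List Int)) (adjacentNum : Int) : Int :=
  let listSize : Int := PySem.List.len grid
  let rangeLimit : Int := listSize - adjacentNum + 1
  -- search vertically
  let gp1 : Int := (PySem.List.pyRange 0 listSize 1).foldl (fun gp column =>
    (PySem.List.pyRange 0 rangeLimit 1).foldl (fun gp row =>
      let product := (PySem.List.pyRange 0 adjacentNum 1).foldl (fun product i =>
        product * PySem.List.pyGetD (PySem.List.pyGetD grid (row + i) []) column 0) 1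
      if product > gp then product else gp) gp) 0
  -- search horizontally
  let gp2 : Int := (PySem.List.pyRange 0 listSize 1).foldl (fun gp row =>
    (PySem.List.pyRange 0 rangeLimit 1).foldl (fun gp column =>
      let product := (PySem.List.pyRange 0 adjacentNum 1).foldl (fun product i =>
        product * PySem.List.pyGetD (PySem.List.pyGetD grid row []) (column + i) 0) 1
      if product > gp then product else gp) gp) gp1
  gp2

-- ===== PORT B =====
-- body of B's inner 'for i in range(n)' loop (state = (prod, zeros, best))
def pvStep (k : Int) (ln : List Int) (st : Int × Int × Int) (i : Int) : Int × Int × Int :=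
  let x := PySem.List.pyGetD ln i 0
  let pz : Int × Int := if x = 0 then (st.1, st.2.1 + 1) else (st.1 * x, st.2.1)
  let pz2 : Int × Int :=
    if k ≤ i then
      let y := PySem.List.pyGetD ln (i - k) 0
      if y = 0 then (pz.1, pz.2 - 1) else (PySem.Int.floordiv pz.1 y, pz.2)
    else pz
  let best2 : Int :=
    if k - 1 ≤ i then
      let p := if pz2.2 = 0 then pz2.1 else 0
      if p > st.2.2 then p else st.2.2
    else st.2.2
  (pz2.1, pz2.2, best2)

-- the sliding-window scan of one line, folding its window products into 'best'
def pvLineBest (k n : Int) (best : Int) (ln : List Int) : Int :=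
  ((PySem.List.pyRange 0 n 1).foldl (pvStep k ln) (1, 0, best)).2.2

def searchAdjacentNumbersInGrid_alt (grid : List (List Int)) (adjacentNum : Int) : Int :=
  let n : Int := PySem.List.len grid
  let k := adjacentNum
  if n < k then 0 else  -- no run of k adjacent entries fits in the grid
  let lines : List (List Int) :=
    grid.map (fun row => PySem.List.slice row none (some n))
    ++ (PySem.List.pyRange 0 n 1).map (fun c =>
         (PySem.List.pyRange 0 n 1).map (fun r =>
           PySem.List.pyGetD (PySem.List.pyGetD grid r []) c 0))
  lines.foldl (fun best ln => pvLineBest k n best ln) 0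

-- ===== PRECONDITION & SPEC =====
-- Pre_ excludes exactly the inputs on which one of the programs raises: a ragged grid
-- (some row shorter than the grid is tall) with adjacentNum ≤ len(grid) makes the n×n
-- indexing raise IndexError (in A whenever it reads any entry, i.e. unless the empty
-- product loop of adjacentNum ≤ 0 saves it; in B always), and a negative adjacentNum on
-- a nonempty grid makes B's sliding-window removal index raise IndexError where A's
-- empty ranges return an artefact 1.
def Pre_searchAdjacentNumbersInGrid (grid : List (List Int)) (adjacentNum : Int) : Prop :=
  (0 ≤ adjacentNum ∨ grid = []) ∧
    (((grid.length : Int) < adjacentNum) ∨ ∀ row ∈ grid, grid.length ≤ row.length)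
instance (grid : List (List Int)) (adjacentNum : Int) : Decidable (Pre_searchAdjacentNumbersInGrid grid adjacentNum) := by unfold Pre_searchAdjacentNumbersInGrid; infer_instance

def pvWitness_searchAdjacentNumbersInGrid : List (List Int) × Int := ([[1, 2], [3, 4]], 2)

def Spec_searchAdjacentNumbersInGrid (grid : List (List Int)) (adjacentNum : Int) (out : Int) : Prop := out = searchAdjacentNumbersInGrid_alt grid adjacentNum
instance (grid : List (List Int)) (adjacentNum : Int) (out : Int) : Decidable (Spec_searchAdjacentNumbersInGrid grid adjacentNum out) := by unfold Spec_searchAdjacentNumbersInGrid; infer_instance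

-- ===== CLAIM (what is proved, stated in full; the proofs are below) =====
def Claim_equal_searchAdjacentNumbersInGrid : Prop := ∀ (grid : List (List Int)) (adjacentNum : Int), Dom_searchAdjacentNumbersInGrid grid adjacentNum → Pre_searchAdjacentNumbersInGrid grid adjacentNum → Spec_searchAdjacentNumbersInGrid grid adjacentNum (searchAdjacentNumbersInGrid grid adjacentNum)

-- ===== LEMMAS AND PROOFS =====

def winP (ln : List Int) (K s : Nat) : Int := ((ln.take (s + K)).drop s).prod
def pvP (l : List Int) : Int := (l.filter (fun x => decide (x ≠ 0))).prod
def pvZ (l : List Int) : Int := ((l.count 0 : Nat) : Int)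

theorem pv_maxIf (b p : Int) : (if p > b then p else b) = max b p := by
  by_cases h : p > b <;> simp [h, max_def] <;> omega

theorem pv_take_drop_snoc (l : List Int) (m j : Nat) (hm : m ≤ j) (hj : j < l.length) :
    (l.take (j + 1)).drop m = (l.take j).drop m ++ [l[j]'hj] := by
  rw [List.take_add_one, List.getElem?_eq_getElem hj, Option.toList_some,
    List.drop_append_of_le_length (by simp [List.length_take]; omega)]

theorem pv_take_drop_cons (l : List Int) (m j : Nat) (hm : m < j) (hj : j ≤ l.length) :
    (l.take j).drop m = l[m]'(by omega) :: (l.take j).drop (m + 1) := by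
  rw [List.drop_eq_getElem_cons (by simp [List.length_take]; omega)]
  simp [List.getElem_take]

theorem pv_phase_add (segO : List Int) (x : Int) :
    (if x = 0 then (pvP segO, pvZ segO + 1) else (pvP segO * x, pvZ segO))
      = (pvP (segO ++ [x]), pvZ (segO ++ [x])) := by
  by_cases hx : x = 0 <;>
    simp [hx, pvP, pvZ, List.filter_append, List.prod_append, List.count_append]

theorem pv_phase_pop (segN : List Int) (y : Int) :
    (if y = 0 then (pvP (y :: segN), pvZ (y :: segN) - 1)
     else (PySem.Int.floordiv (pvP (y :: segN)) y, pvZ (y :: segN)))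
      = (pvP segN, pvZ segN) := by
  by_cases hy : y = 0
  · simp [hy, pvP, pvZ]
  · simp [hy, pvP, pvZ, PySem.Int.floordiv]

theorem pv_emit (l : List Int) :
    (if pvZ l = 0 then pvP l else 0) = l.prod := by
  unfold pvP pvZ
  by_cases h : l.count 0 = 0
  · have h0 : (0 : Int) ∉ l := by
      intro hm; exact absurd (List.count_pos_iff.2 hm) (by omega)
    have he : l.filter (fun x => decide (x ≠ 0)) = l :=
      List.filter_eq_self.2 (fun a ha => by simp; intro h'; exact h0 (h' ▸ ha))
    have hc : ((l.count 0 : Nat) : Int) = 0 := by exact_mod_cast h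
    rw [if_pos hc, he]
  · have h0 : (0 : Int) ∈ l := List.count_pos_iff.1 (by omega)
    have hp := List.prod_eq_zero h0
    have hc : ¬ ((l.count 0 : Nat) : Int) = 0 := by
      intro h'; apply h; exact_mod_cast h'
    rw [if_neg hc, hp]

theorem pv_invariant (K : Nat) (hK : 1 ≤ K) (ln : List Int) (N : Nat)
    (hlen : ln.length = N) (b : Int) (j : Nat) (hj : j ≤ N) :
    ((List.range j).map (fun (t : Nat) => (t : Int))).foldl (pvStep (K : Int) ln) (1, 0, b)
      = (pvP ((ln.take j).drop (j - K)),
         pvZ ((ln.take j).drop (j - K)),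
         List.foldl max b ((List.range (j - (K - 1))).map (fun s => winP ln K s))) := by
  induction j with
  | zero => simp [pvP, pvZ]
  | succ j ih =>
      have hjN : j < N := by omega
      have hjlt : j < ln.length := by omega
      specialize ih (by omega)
      rw [List.range_succ, List.map_append, List.map_cons, List.map_nil,
        List.foldl_append, ih, List.foldl_cons, List.foldl_nil]
      have hsnoc := pv_take_drop_snoc ln (j - K) j (by omega) hjlt
      have hx : PySem.List.pyGetD ln ((j : Nat) : Int) 0 = ln[j]'hjlt := by
        rw [PySem.List.pyGetD_natCast]
        exact List.getD_eq_getElem ln 0 hjlt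
      by_cases hKj : K ≤ j
      · -- removal branch taken
        have hc : ((K : Nat) : Int) ≤ ((j : Nat) : Int) := by exact_mod_cast hKj
        have hyi : ((j : Nat) : Int) - ((K : Nat) : Int) = (((j - K : Nat)) : Int) := by
          omega
        have hylt : j - K < ln.length := by omega
        have hy : PySem.List.pyGetD ln (((j : Nat) : Int) - ((K : Nat) : Int)) 0
            = ln[j - K]'hylt := by
          rw [hyi, PySem.List.pyGetD_natCast]
          exact List.getD_eq_getElem ln 0 hylt
        have hcons := pv_take_drop_cons ln (j - K) (j + 1) (by omega) (by omega)
        have hsub1 : j + 1 - K = (j - K) + 1 := by omega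
        have hMN : (ln.take j).drop (j - K) ++ [ln[j]'hjlt]
            = ln[j - K]'hylt :: (ln.take (j+1)).drop (j + 1 - K) := by
          rw [← hsnoc, hsub1, ← hcons]
        have hK1 : ((K : Nat) : Int) - 1 ≤ ((j : Nat) : Int) := by omega
        have hstart : (j + 1) - (K - 1) = (j - (K - 1)) + 1 := by omega
        have heq : (j + 1 - K) + K = j + 1 := by omega
        have hwin : winP ln K (j + 1 - K) = ((ln.take (j+1)).drop (j + 1 - K)).prod := by
          unfold winP; rw [heq]
        have hs0 : j - (K - 1) = j + 1 - K := by omega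
        simp only [pvStep, hx, hy, if_pos hc, if_pos hK1, pv_phase_add, hMN, pv_phase_pop,
          pv_emit, pv_maxIf, hstart, List.range_succ, List.map_append, List.map_cons,
          List.map_nil, List.foldl_append, List.foldl_cons, List.foldl_nil, hs0, hwin]
      · -- no removal: j < K
        have hc : ¬ ((K : Nat) : Int) ≤ ((j : Nat) : Int) := by omega
        have hsub : (j + 1) - K = j - K := by omega
        have hsub0 : j - K = 0 := by omega
        by_cases hK1 : K ≤ j + 1
        · -- K = j + 1 exactly: first emission
          have hc1 : ((K : Nat) : Int) - 1 ≤ ((j : Nat) : Int) := by omega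
          have hstart : (j + 1) - (K - 1) = (j - (K - 1)) + 1 := by omega
          have hs0 : j - (K - 1) = 0 := by omega
          have heq : (0 : Nat) + K = j + 1 := by omega
          have hwin : winP ln K 0 = ((ln.take (j+1)).drop 0).prod := by
            unfold winP; rw [heq]
          simp only [pvStep, hx, if_neg hc, if_pos hc1, pv_phase_add, pv_emit, pv_maxIf,
            hsub, hsub0, hstart, hs0, List.range_succ, List.range_zero,
            List.map_append, List.map_cons, List.map_nil, List.foldl_append,
            List.foldl_cons, List.foldl_nil, List.drop_zero] at *
          rw [hwin, hsnoc]
        · have hc1 : ¬ (((K : Nat) : Int) - 1 ≤ ((j : Nat) : Int)) := by omega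
          have hstart : (j + 1) - (K - 1) = j - (K - 1) := by omega
          simp only [pvStep, hx, if_neg hc, if_neg hc1, pv_phase_add, hstart, hsub, hsub0]
          rw [pv_take_drop_snoc ln 0 j (Nat.zero_le j) hjlt]

theorem pv_lineBest_eq (K N : Nat) (hK : 1 ≤ K) (ln : List Int)
    (hlen : ln.length = N) (b : Int) :
    pvLineBest (K : Int) (N : Int) b ln
      = List.foldl max b ((List.range (N - (K - 1))).map (fun s => winP ln K s)) := by
  unfold pvLineBest
  rw [PySem.List.pyRange_zero_nat, pv_invariant K hK ln N hlen b N (le_refl N)]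

theorem pv_foldl_mul (l : List Nat) (f : Nat → Int) (a : Int) :
    l.foldl (fun p i => p * f i) a = a * (l.map f).prod := by
  induction l generalizing a with
  | nil => simp
  | cons x t ih => simp [List.foldl_cons, ih, mul_assoc]

theorem pv_foldl_max_map (l : List α) (f : α → Int) (a : Int) :
    l.foldl (fun acc x => max acc (f x)) a = List.foldl max a (l.map f) := by
  rw [List.foldl_map]

theorem pv_foldl_foldl_max (L : List α) (g : α → List Int) (a : Int) :
    L.foldl (fun acc x => List.foldl max acc (g x)) a
      = List.foldl max a (L.flatMap g) := by
  induction L generalizing a with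
  | nil => simp
  | cons x t ih => simp [List.foldl_cons, List.flatMap_cons, List.foldl_append, ih]

theorem pv_foldl_max_perm {l₁ l₂ : List Int} (h : l₁.Perm l₂) (a : Int) :
    List.foldl max a l₁ = List.foldl max a l₂ := by
  haveI : Std.Commutative (max : Int → Int → Int) := ⟨fun x y => max_comm x y⟩
  haveI : Std.Associative (max : Int → Int → Int) := ⟨fun x y z => max_assoc x y z⟩
  exact h.foldl_eq a

theorem pv_flatMap_range (l : List (List Int)) (F : List Int → List Int) :
    l.flatMap F = (List.range l.length).flatMap (fun r => F (l.getD r [])) := by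
  induction l with
  | nil => simp
  | cons x t ih =>
      simp [List.flatMap_cons, List.range_succ_eq_map, ih, List.flatMap_map]

theorem pv_prodSeq_eq_winP (ln : List Int) (K s : Nat) (h : s + K ≤ ln.length) :
    ((List.range K).map (fun i => ln.getD (s + i) 0)).prod = winP ln K s := by
  induction K with
  | zero => simp [winP]
  | succ m ih =>
      have hm : s + m ≤ ln.length := by omega
      have hlt : s + m < ln.length := by omega
      have h1 := pv_take_drop_snoc ln s (s + m) (by omega) hlt
      have h2 : s + (m + 1) = (s + m) + 1 := by omega
      unfold winP at *
      rw [h2, h1, List.range_succ, List.map_append, List.prod_append, List.prod_append,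
        ← ih hm]
      simp
      exact Or.inl (by rw [List.getElem?_eq_getElem hlt]; rfl)

theorem pv_winP_take (ln : List Int) (K s n : Nat) (h : s + K ≤ n) :
    winP (ln.take n) K s = winP ln K s := by
  simp [winP, List.take_take, min_eq_left h]

theorem pv_A_eq (grid : List (List Int)) (K : Nat) (hK : 1 ≤ K) :
    searchAdjacentNumbersInGrid grid (K : Int)
      = List.foldl max 0
          (((List.range grid.length).flatMap (fun c =>
              (List.range (grid.length - (K - 1))).map (fun s =>
                ((List.range K).map (fun i => (grid.getD (s + i) []).getD c 0)).prod)))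
           ++ ((List.range grid.length).flatMap (fun r =>
              (List.range (grid.length - (K - 1))).map (fun s =>
                ((List.range K).map (fun i => (grid.getD r []).getD (s + i) 0)).prod)))) := by
  unfold searchAdjacentNumbersInGrid
  simp only [PySem.List.len_eq]
  have h1 : (((grid.length : Int)) - (K : Int) + 1).toNat = grid.length - (K - 1) := by
    omega
  rw [PySem.List.pyRange_zero ((grid.length : Int) - (K : Int) + 1)]
  rw [PySem.List.pyRange_zero_nat grid.length, PySem.List.pyRange_zero_nat K]
  simp only [h1]
  simp only [List.foldl_map, ← Int.natCast_add, PySem.List.pyGetD_natCast]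
  simp only [pv_foldl_mul, one_mul, pv_maxIf]
  simp only [pv_foldl_max_map, pv_foldl_foldl_max]
  rw [← List.foldl_append]

def colLine (grid : List (List Int)) (n c : Nat) : List Int :=
  (List.range n).map (fun r => (grid.getD r []).getD c 0)

theorem pv_fold_lines (K n : Nat) (hK : 1 ≤ K) (L : List (List Int))
    (hL : ∀ l ∈ L, l.length = n) (a : Int) :
    L.foldl (fun b ln => pvLineBest (K : Int) (n : Int) b ln) a
      = List.foldl max a (L.flatMap (fun l =>
          (List.range (n - (K - 1))).map (fun s => winP l K s))) := by
  induction L generalizing a with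
  | nil => simp
  | cons x t ih =>
      rw [List.foldl_cons, List.flatMap_cons, List.foldl_append,
        pv_lineBest_eq K n hK x (hL x (by simp)) a, ih (fun l hl => hL l (by simp [hl]))]

theorem pv_B_eq (grid : List (List Int)) (K : Nat) (hK : 1 ≤ K)
    (hKn : K ≤ grid.length)
    (hrows : ∀ row ∈ grid, grid.length ≤ row.length) :
    searchAdjacentNumbersInGrid_alt grid (K : Int)
      = List.foldl max 0
          (((List.range grid.length).flatMap (fun r =>
              (List.range (grid.length - (K - 1))).map (fun s =>
                winP ((grid.getD r []).take grid.length) K s)))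
           ++ ((List.range grid.length).flatMap (fun c =>
              (List.range (grid.length - (K - 1))).map (fun s =>
                winP (colLine grid grid.length c) K s)))) := by
  unfold searchAdjacentNumbersInGrid_alt
  simp only [PySem.List.len_eq]
  rw [if_neg (by omega)]
  simp only [ PySem.List.pyRange_zero_nat, List.map_map,
    Function.comp_def, PySem.List.slice_to_natCast,
    PySem.List.pyGetD_natCast]
  rw [pv_fold_lines K grid.length hK _ ?hlen 0]
  case hlen =>
    intro l hl
    rcases List.mem_append.1 hl with h | h
    · rcases List.mem_map.1 h with ⟨row, hrow, rfl⟩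
      simp [List.length_take]
      exact hrows row hrow
    · rcases List.mem_map.1 h with ⟨c, _, rfl⟩
      simp
  rw [List.flatMap_append, List.flatMap_map, List.flatMap_map]
  congr 2
  · exact (pv_flatMap_range grid _).trans rfl

theorem pv_colLine_getD (grid : List (List Int)) (n c m : Nat) (hm : m < n) :
    (colLine grid n c).getD m 0 = (grid.getD m []).getD c 0 := by
  unfold colLine
  rw [List.getD_eq_getElem _ _ (by simpa using hm)]
  simp


-- k ≤ 0: every window product is the empty product 1
theorem pv_foldl_max_one {α : Type} (l : List α) (a : Int) (h : l ≠ []) :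
    l.foldl (fun b _ => max b 1) a = max a 1 := by
  induction l generalizing a with
  | nil => exact absurd rfl h
  | cons x t ih =>
      rw [List.foldl_cons]
      rcases t with _ | ⟨y, t⟩
      · simp
      · rw [ih (max a 1) (List.cons_ne_nil y t)]
        simp

theorem pv_A_nil (k : Int) : searchAdjacentNumbersInGrid [] k = 0 := by
  simp [searchAdjacentNumbersInGrid, PySem.List.len_eq,
    PySem.List.pyRange_one_eq_nil (le_refl (0 : Int))]

theorem pv_B_nil (k : Int) : searchAdjacentNumbersInGrid_alt [] k = 0 := by
  unfold searchAdjacentNumbersInGrid_alt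
  simp [PySem.List.len_eq, PySem.List.pyRange_one_eq_nil (le_refl (0 : Int))]

-- with k ≤ 0 and a nonempty grid, A's empty product loop makes every window worth 1
theorem pv_A_k0 (grid : List (List Int)) (k : Int) (hk : k ≤ 0)
    (hn : grid ≠ []) : searchAdjacentNumbersInGrid grid k = 1 := by
  have hn1 : 1 ≤ grid.length := List.length_pos_iff.2 hn
  unfold searchAdjacentNumbersInGrid
  simp only [PySem.List.len_eq]
  rw [PySem.List.pyRange_one_eq_nil (show k ≤ 0 from hk)]
  simp only [List.foldl_nil, pv_maxIf]
  have hne : PySem.List.pyRange 0 ((grid.length : Int) - k + 1) 1 ≠ [] := by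
    rw [PySem.List.pyRange_one_cons (by omega)]
    simp
  have hne2 : PySem.List.pyRange 0 (grid.length : Int) 1 ≠ [] := by
    rw [PySem.List.pyRange_one_cons (by omega)]
    simp
  have hinner : ∀ a : Int,
      (PySem.List.pyRange 0 ((grid.length : Int) - k + 1) 1).foldl
        (fun gp _ => max gp 1) a = max a 1 := fun a => pv_foldl_max_one _ a hne
  simp only [hinner]
  rw [pv_foldl_max_one _ 0 hne2, pv_foldl_max_one _ (max 0 1) hne2]
  simp

-- with k = 0 the sliding window is empty: each step leaves (1, 0, ·) and emits 1
theorem pv_step_k0 (ln : List Int) (b : Int) (i : Int) (hi : 0 ≤ i) :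
    pvStep 0 ln (1, 0, b) i = (1, 0, max b 1) := by
  unfold pvStep
  have h2 : (0 : Int) - 1 ≤ i := by omega
  simp only [sub_zero, if_pos hi, if_pos h2]
  by_cases hx : PySem.List.pyGetD ln i 0 = 0
  · simp [hx, pv_maxIf]
  · have hc : PySem.Int.floordiv (PySem.List.pyGetD ln i 0) (PySem.List.pyGetD ln i 0)
        = 1 := by
      unfold PySem.Int.floordiv
      have h := Int.mul_fdiv_cancel_left (1 : Int) hx
      rwa [mul_one] at h
    simp [hx, hc, pv_maxIf]

theorem pv_scan_k0 (ln : List Int) (b : Int) (j : Nat) (hj : 1 ≤ j) :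
    List.foldl (pvStep 0 ln) (1, 0, b) ((List.range j).map (fun (t : Nat) => (t : Int)))
      = (1, 0, max b 1) := by
  induction j with
  | zero => omega
  | succ m ih =>
      rw [List.range_succ, List.map_append, List.foldl_append]
      rcases Nat.eq_zero_or_pos m with hm | hm
      · subst hm
        simp [pv_step_k0 ln b 0 (le_refl 0)]
      · rw [ih hm, List.map_cons, List.map_nil, List.foldl_cons, List.foldl_nil,
          pv_step_k0 ln (max b 1) (m : Int) (by positivity)]
        simp

theorem pv_lineBest_k0 (ln : List Int) (n : Nat) (b : Int) (hn : 1 ≤ n) :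
    pvLineBest 0 (n : Int) b ln = max b 1 := by
  unfold pvLineBest
  rw [PySem.List.pyRange_zero_nat, pv_scan_k0 ln b n hn]

theorem pv_B_k0 (grid : List (List Int)) (hn : grid ≠ []) :
    searchAdjacentNumbersInGrid_alt grid 0 = 1 := by
  have hn1 : 1 ≤ grid.length := List.length_pos_iff.2 hn
  unfold searchAdjacentNumbersInGrid_alt
  simp only [PySem.List.len_eq]
  rw [if_neg (by omega)]
  have hlb : ∀ (b : Int) (ln : List Int),
      pvLineBest 0 (grid.length : Int) b ln = max b 1 :=
    fun b ln => pv_lineBest_k0 ln grid.length b hn1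
  simp only [hlb]
  rw [pv_foldl_max_one _ 0 (by
    simp only [ne_eq, List.append_eq_nil_iff, List.map_eq_nil_iff]
    intro ⟨h1, _⟩
    exact hn h1)]
  simp

-- if no window fits, A's row/column loops run over empty ranges and return 0
theorem pv_A_empty (grid : List (List Int)) (k : Int) (hk : (grid.length : Int) < k) :
    searchAdjacentNumbersInGrid grid k = 0 := by
  unfold searchAdjacentNumbersInGrid
  simp only [PySem.List.len_eq]
  rw [PySem.List.pyRange_one_eq_nil (show (grid.length : Int) - k + 1 ≤ 0 by omega)]
  simp

theorem pv_final (grid : List (List Int)) (k : Int)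
    (hk : 0 ≤ k ∨ grid = [])
    (hpre : ((grid.length : Int) < k) ∨ ∀ row ∈ grid, grid.length ≤ row.length) :
    searchAdjacentNumbersInGrid grid k = searchAdjacentNumbersInGrid_alt grid k := by
  rcases eq_or_ne grid [] with hnil | hnil
  · subst hnil; rw [pv_A_nil, pv_B_nil]
  have hk0 : 0 ≤ k := hk.resolve_right hnil
  rcases eq_or_ne k 0 with hz | hz
  · subst hz; rw [pv_A_k0 grid 0 (le_refl 0) hnil, pv_B_k0 grid hnil]
  have hk : 1 ≤ k := by omega
  by_cases hbig : (grid.length : Int) < k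
  · rw [pv_A_empty grid k hbig]
    unfold searchAdjacentNumbersInGrid_alt
    rw [PySem.List.len_eq, if_pos hbig]
  have hrows : ∀ row ∈ grid, grid.length ≤ row.length := by
    rcases hpre with h | h
    · exact absurd h hbig
    · exact h
  have hcast : ((k.toNat : Nat) : Int) = k := by omega
  have hK : 1 ≤ k.toNat := by omega
  have hKn : k.toNat ≤ grid.length := by omega
  set K := k.toNat with hKdef
  set n := grid.length with hn
  rw [← hcast, pv_A_eq grid K hK, pv_B_eq grid K hK hKn hrows]
  have hV : (List.range n).flatMap (fun c =>
        (List.range (n - (K - 1))).map (fun s =>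
          ((List.range K).map (fun i => (grid.getD (s + i) []).getD c 0)).prod))
      = (List.range n).flatMap (fun c =>
        (List.range (n - (K - 1))).map (fun s => winP (colLine grid n c) K s)) := by
    apply List.flatMap_congr
    intro c _
    apply List.map_congr_left
    intro s hs
    have hsW : s < n - (K - 1) := List.mem_range.1 hs
    have hsK : s + K ≤ n := by omega
    have hlen : (colLine grid n c).length = n := by simp [colLine]
    rw [← pv_prodSeq_eq_winP (colLine grid n c) K s (by rw [hlen]; exact hsK)]
    congr 1
    apply List.map_congr_left
    intro i hi
    have : s + i < n := by have := List.mem_range.1 hi; omega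
    rw [pv_colLine_getD grid n c (s + i) this]
  have hH : (List.range n).flatMap (fun r =>
        (List.range (n - (K - 1))).map (fun s =>
          ((List.range K).map (fun i => (grid.getD r []).getD (s + i) 0)).prod))
      = (List.range n).flatMap (fun r =>
        (List.range (n - (K - 1))).map (fun s => winP ((grid.getD r []).take n) K s)) := by
    apply List.flatMap_congr
    intro r hr
    have hrn : r < n := List.mem_range.1 hr
    have hmem : grid.getD r [] ∈ grid := by
      rw [List.getD_eq_getElem _ _ (by omega)]
      exact List.getElem_mem _
    have hrow : n ≤ (grid.getD r []).length := hrows _ hmem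
    apply List.map_congr_left
    intro s hs
    have hsW : s < n - (K - 1) := List.mem_range.1 hs
    have hsK : s + K ≤ n := by omega
    rw [pv_winP_take _ K s n hsK,
      pv_prodSeq_eq_winP (grid.getD r []) K s (by omega)]
  rw [hV, hH]
  exact pv_foldl_max_perm List.perm_append_comm 0

-- ===== VERDICT (by name: the statement is the Claim_ definition above) =====
theorem searchAdjacentNumbersInGrid_spec : Claim_equal_searchAdjacentNumbersInGrid := by
  intro grid adjacentNum _hDom hPre
  unfold Spec_searchAdjacentNumbersInGrid
  exact pv_final grid adjacentNum hPre.1 hPre.2
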